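-- pv_equiv track=rewrite | github.com/Nicola-Zhang/leetcode.python | my_leetcode.python/test.py | dataloader
-- ===== SOURCE A (Python) =====
-- def dataloader(inputs):
--     voc_table = voc2id(inputs)
--
--     output = []
--
--     bsz = 2
--     data_len = len(inputs)
--     for s_idx in range(0, data_len, bsz):
--         e_idx = s_idx+2 if s_idx+2 < data_len else data_len
--         batch = tokenizer(voc_table, inputs[s_idx: e_idx], max_length=5, batch_size=bsz)
--         output.append(batch)
--
--     return output
--
-- def voc2id(inputs):
--     id_dict = {}
--     for input in inputs:
--         for i in input:
--             if i not in id_dict: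
--                 id_dict[i] = len(id_dict)+1
--     return id_dict
--
-- def tokenizer(id_dict, inputs, max_length, batch_size):
--     batch_inputs = []
--     for input in inputs:
--         input_id = [id_dict[i] for i in input]
--         if len(input_id) >= max_length:
--             input_id = input_id[:max_length]
--         else:
--             for _ in range(max_length-len(input_id)):
--                 input_id.append(0)
--         batch_inputs.append(input_id)
--
--     if len(batch_inputs) < batch_size:
--         for _ in range(batch_size-len(batch_inputs)):
--             batch_inputs.append([0]*max_length)
--     return batch_inputs
-- ===== SOURCE B (Python) =====
-- def dataloader(inputs):
--     # Build the vocab in one pass, tokenize every input independently,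
--     # then group the flat row list two-at-a-time, padding a lone final row.
--     vocab = {}
--     for s in inputs:
--         for c in s:
--             if c not in vocab:
--                 vocab[c] = len(vocab) + 1
--     rows = [([vocab[c] for c in s] + [0] * 5)[:5] for s in inputs]
--     out = []
--     pair = []
--     for row in rows:
--         pair = pair + [row]
--         if len(pair) == 2:
--             out.append(pair)
--             pair = []
--     if pair:
--         out.append([pair[0], [0] * 5])
--     return out
-- ===== Notes on version B (the rewrite author's own statement) =====
-- stated objective: alternative
-- what changed: A chunks the inputs into batches of 2 first and tokenizes/pads inside each batch; B builds the vocab, tokenizes every input independently into a flat list of length-5 rows, then groups that list two rows at a time with a pair buffer (padding a lone final row), inverting the nesting.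
import Mathlib
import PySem

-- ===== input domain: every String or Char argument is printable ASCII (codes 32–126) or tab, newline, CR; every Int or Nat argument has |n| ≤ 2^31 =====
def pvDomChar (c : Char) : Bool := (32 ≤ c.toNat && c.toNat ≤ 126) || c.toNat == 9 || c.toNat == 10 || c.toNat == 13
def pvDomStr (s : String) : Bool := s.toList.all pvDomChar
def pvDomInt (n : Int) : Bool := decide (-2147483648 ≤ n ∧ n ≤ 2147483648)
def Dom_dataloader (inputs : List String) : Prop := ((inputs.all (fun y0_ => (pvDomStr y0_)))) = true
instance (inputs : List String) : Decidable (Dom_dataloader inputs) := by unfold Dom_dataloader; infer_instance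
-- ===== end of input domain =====

-- B inverts A's nesting: tokenize all inputs first, then chunk the flat row list into pairs (alternative decomposition, same cost).

-- ===== PORT A =====
-- voc2id: dict of first-appearance char ids starting at 1
def voc2id (inputs : List String) : PySem.Dict Char Int :=
  inputs.foldl (fun d s =>
    s.toList.foldl (fun d c =>
      if !(d.contains c) then d.insert c ((d.size : Int) + 1) else d) d)
    PySem.Dict.empty

-- one row of tokenizer's loop body: id list, truncated to max_length or right-padded with 0.
-- id_dict[i] is ported as (get? …).getD 0: exact here, since every char of the tokenized
-- strings was inserted into the dict by voc2id, so the key is always present.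
def tokRow (d : PySem.Dict Char Int) (maxLength : Int) (s : String) : List Int :=
  let input_id := s.toList.map (fun c => (d.get? c).getD 0)
  if (input_id.length : Int) ≥ maxLength then
    PySem.List.slice input_id none (some maxLength)
  else
    input_id ++ List.replicate (maxLength - input_id.length).toNat 0

def tokenizer (d : PySem.Dict Char Int) (inputs : List String)
    (maxLength batchSize : Int) : List (List Int) :=
  let batch := inputs.foldl (fun acc s => acc ++ [tokRow d maxLength s]) []
  if (batch.length : Int) < batchSize then
    batch ++ List.replicate (batchSize - batch.length).toNat (List.replicate maxLength.toNat 0)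
  else batch

def dataloader (inputs : List String) : List (List (List Int)) :=
  let voc_table := voc2id inputs
  let bsz : Int := 2
  let data_len : Int := inputs.length
  (PySem.List.pyRange 0 data_len bsz).foldl (fun output s_idx =>
    let e_idx := if s_idx + 2 < data_len then s_idx + 2 else data_len
    output ++ [tokenizer voc_table (PySem.List.slice inputs (some s_idx) (some e_idx)) 5 2]) []

-- ===== PORT B =====
def vocB (inputs : List String) : PySem.Dict Char Int :=
  inputs.foldl (fun d s =>
    s.toList.foldl (fun d c =>
      if !(d.contains c) then d.insert c ((d.size : Int) + 1) else d) d)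
    PySem.Dict.empty

-- ([vocab[c] for c in s] + [0]*5)[:5]; vocab[c] ported as getD 0 (key always present, as above)
def tok1 (d : PySem.Dict Char Int) (s : String) : List Int :=
  ((s.toList.map (fun c => (d.get? c).getD 0)) ++ List.replicate 5 0).take 5

-- the for-loop's body: accumulate rows into a 2-row buffer, flushing full buffers into out
def chunkStep (st : List (List (List Int)) × List (List Int)) (row : List Int) :
    List (List (List Int)) × List (List Int) :=
  let pair := st.2 ++ [row]
  if pair.length == 2 then (st.1 ++ [pair], []) else (st.1, pair)

def dataloader_alt (inputs : List String) : List (List (List Int)) :=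
  let rows := inputs.map (tok1 (vocB inputs))
  let st := rows.foldl chunkStep ([], [])
  if st.2 ≠ [] then st.1 ++ [[PySem.List.pyGetD st.2 0 [], List.replicate 5 (0 : Int)]]
  else st.1

-- ===== PRECONDITION & SPEC =====
def Spec_dataloader (inputs : List String) (out : List (List (List Int))) : Prop := out = dataloader_alt inputs
instance (inputs : List String) (out : List (List (List Int))) : Decidable (Spec_dataloader inputs out) := by unfold Spec_dataloader; infer_instance

-- ===== CLAIM (what is proved, stated in full; the proofs are below) =====
def Claim_equal_dataloader : Prop := ∀ (inputs : List String), Dom_dataloader inputs → Spec_dataloader inputs (dataloader inputs)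

-- ===== LEMMAS AND PROOFS =====

-- proof-side normal form of B's pair-buffer loop: rows grouped two at a time
def chunk2 : List (List Int) → List (List (List Int))
  | [] => []
  | [r] => [[r, List.replicate 5 (0 : Int)]]
  | r1 :: r2 :: rest => [r1, r2] :: chunk2 rest

theorem pyRange_two_nil (a b : Int) (h : b ≤ a) : PySem.List.pyRange a b 2 = [] := by
  rw [PySem.List.pyRange_of_pos _ _ (by norm_num)]
  rw [if_neg (by omega)]
  simp

theorem pyRange_two_cons (a b : Int) (h : a < b) :
    PySem.List.pyRange a b 2 = a :: PySem.List.pyRange (a + 2) b 2 := by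
  rw [PySem.List.pyRange_of_pos _ _ (by norm_num : (0:Int) < 2),
      PySem.List.pyRange_of_pos _ _ (by norm_num : (0:Int) < 2)]
  rw [if_pos h]
  by_cases h2 : a + 2 < b
  · rw [if_pos h2]
    have hc : ((b - a + 2 - 1) / 2).toNat = ((b - (a + 2) + 2 - 1) / 2).toNat + 1 := by omega
    rw [hc, List.range_succ_eq_map]
    simp only [List.map_cons, List.map_map]
    refine congrArg₂ _ (by push_cast; ring) (List.map_congr_left fun k _ => ?_)
    simp only [Function.comp_apply, Nat.succ_eq_add_one]
    push_cast; ring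
  · rw [if_neg h2]
    have hc : ((b - a + 2 - 1) / 2).toNat = 1 := by omega
    rw [hc]
    simp

theorem tokRow_eq_tok1 (d : PySem.Dict Char Int) (s : String) :
    tokRow d 5 s = tok1 d s := by
  simp only [tokRow, tok1]
  set l := s.toList.map (fun c => (d.get? c).getD (0:Int)) with hl
  rw [List.take_append]
  by_cases h : ((l.length : Int)) ≥ 5
  · rw [if_pos h, PySem.List.slice_to l (by norm_num)]
    have h0 : 5 - l.length = 0 := by omega
    simp [h0]
  · rw [if_neg h]
    have ht : l.take 5 = l := List.take_of_length_le (by omega)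
    rw [ht, List.take_replicate]
    have hn : (5 - (l.length : Int)).toNat = min (5 - l.length) 5 := by omega
    rw [hn]

theorem tokenizer_pair (d : PySem.Dict Char Int) (s1 s2 : String) :
    tokenizer d [s1, s2] 5 2 = [tok1 d s1, tok1 d s2] := by
  simp [tokenizer, List.foldl, tokRow_eq_tok1]

theorem tokenizer_single (d : PySem.Dict Char Int) (s : String) :
    tokenizer d [s] 5 2 = [tok1 d s, List.replicate 5 (0 : Int)] := by
  simp [tokenizer, List.foldl, tokRow_eq_tok1]

theorem pyRange_two_shift (b : Int) :
    PySem.List.pyRange 2 (b + 2) 2 = (PySem.List.pyRange 0 b 2).map (fun s => s + 2) := by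
  rw [PySem.List.pyRange_of_pos _ _ (by norm_num : (0:Int) < 2),
      PySem.List.pyRange_of_pos _ _ (by norm_num : (0:Int) < 2)]
  have hc : (if (2:Int) < b + 2 then ((b + 2 - 2 + 2 - 1) / 2).toNat else 0)
      = (if (0:Int) < b then ((b - 0 + 2 - 1) / 2).toNat else 0) := by
    split_ifs <;> omega
  rw [hc, List.map_map]
  exact List.map_congr_left fun k _ => by simp; ring

theorem slice_shift2 {α : Type} (x1 x2 : α) (r : List α) (s e : Int)
    (hs : 0 ≤ s) (he : 0 ≤ e) :
    PySem.List.slice (x1 :: x2 :: r) (some (s + 2)) (some (e + 2))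
      = PySem.List.slice r (some s) (some e) := by
  rw [PySem.List.slice_toNat _ (by omega) (by omega),
      PySem.List.slice_toNat _ hs he]
  have h1 : (s + 2).toNat = s.toNat + 1 + 1 := by omega
  have h2 : (e + 2).toNat - (s + 2).toNat = e.toNat - s.toNat := by omega
  rw [h2, h1, List.drop_succ_cons, List.drop_succ_cons]

theorem two_step_ind {α : Type} (P : List α → Prop) (h0 : P [])
    (h1 : ∀ a, P [a]) (h2 : ∀ a b r, P r → P (a :: b :: r)) : ∀ xs, P xs
  | [] => h0
  | [a] => h1 a
  | a :: b :: r => h2 a b r (two_step_ind P h0 h1 h2 r)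

theorem chunk_loop_eq : ∀ (rows : List (List Int)) (acc : List (List (List Int))),
    (if (rows.foldl chunkStep (acc, [])).2 ≠ [] then
      (rows.foldl chunkStep (acc, [])).1
        ++ [[PySem.List.pyGetD (rows.foldl chunkStep (acc, [])).2 0 [], List.replicate 5 (0:Int)]]
     else (rows.foldl chunkStep (acc, [])).1) = acc ++ chunk2 rows := by
  refine two_step_ind _ ?_ ?_ ?_
  · intro acc; simp [chunk2]
  · intro r acc
    simp [chunkStep, chunk2, PySem.List.pyGetD]
  · intro r1 r2 rest IH acc
    simp only [ne_eq, ite_not] at IH ⊢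
    simp only [List.foldl_cons, chunkStep, List.nil_append, List.length_cons,
      List.length_nil]
    norm_num
    rw [IH (acc ++ [[r1, r2]])]
    simp [chunk2]

theorem loopA_eq (d : PySem.Dict Char Int) : ∀ (xs : List String),
    (PySem.List.pyRange 0 (xs.length : Int) 2).map (fun s_idx =>
      tokenizer d (PySem.List.slice xs (some s_idx)
        (some (if s_idx + 2 < (xs.length : Int) then s_idx + 2 else (xs.length : Int)))) 5 2)
    = chunk2 (xs.map (tok1 d)) := by
  refine two_step_ind _ ?_ ?_ ?_
  · simp only [List.length_nil, Nat.cast_zero, pyRange_two_nil 0 0 le_rfl, List.map_nil, chunk2]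
  · intro a
    have hl : ((([a] : List String)).length : Int) = 1 := by simp
    rw [hl, pyRange_two_cons 0 1 (by norm_num), pyRange_two_nil (0 + 2) 1 (by norm_num)]
    simp only [List.map_cons, List.map_nil]
    norm_num
    rw [PySem.List.slice_to _ (by norm_num : (0:Int) ≤ 1)]
    norm_num [tokenizer_single, chunk2]
  · intro x1 x2 r IH
    have hl : (((x1 :: x2 :: r) : List String).length : Int) = (r.length : Int) + 2 := by
      simp; ring
    rw [hl, pyRange_two_cons 0 ((r.length : Int) + 2) (by positivity)]
    simp only [zero_add, pyRange_two_shift, List.map_cons, List.map_map]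
    have hhead : (if (2:Int) < (r.length : Int) + 2 then (2:Int) else (r.length : Int) + 2) = 2 := by
      split_ifs <;> omega
    have hsl : PySem.List.slice (x1 :: x2 :: r) (some (0:Int)) (some (2:Int)) = [x1, x2] := by
      rw [PySem.List.slice_toNat _ (by norm_num) (by norm_num)]; rfl
    rw [hhead, hsl, tokenizer_pair]
    have htail : (PySem.List.pyRange 0 (r.length : Int) 2).map
        ((fun s_idx => tokenizer d (PySem.List.slice (x1 :: x2 :: r) (some s_idx)
          (some (if s_idx + 2 < (r.length : Int) + 2 then s_idx + 2 else (r.length : Int) + 2))) 5 2)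
          ∘ (fun s => s + 2))
        = (PySem.List.pyRange 0 (r.length : Int) 2).map (fun s_idx =>
            tokenizer d (PySem.List.slice r (some s_idx)
              (some (if s_idx + 2 < (r.length : Int) then s_idx + 2 else (r.length : Int)))) 5 2) := by
      refine List.map_congr_left fun s hs => ?_
      have hmem := (PySem.List.mem_pyRange_iff_of_pos (by norm_num : (0:Int) < 2) s).mp hs
      have hs0 : 0 ≤ s := hmem.1
      simp only [Function.comp_apply]
      have hee : (if s + 2 + 2 < (r.length : Int) + 2 then s + 2 + 2 else (r.length : Int) + 2)
          = (if s + 2 < (r.length : Int) then s + 2 else (r.length : Int)) + 2 := by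
        split_ifs <;> omega
      rw [hee, slice_shift2 _ _ _ _ _ hs0 (by split_ifs <;> omega)]
    rw [htail]
    simp only [chunk2]
    rw [IH]

-- ===== VERDICT (by name: the statement is the Claim_ definition above) =====
theorem dataloader_spec : Claim_equal_dataloader := by
  intro inputs _
  show dataloader inputs = dataloader_alt inputs
  have hv : voc2id inputs = vocB inputs := rfl
  simp only [dataloader, dataloader_alt, hv]
  rw [PySem.List.foldl_append_singleton_eq_map, chunk_loop_eq]
  simpa using loopA_eq (vocB inputs) inputs
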